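-- pv_equiv track=rewrite | github.com/LongHaiTown/CHUOPM_-Correlated-High-Utility-Ocupancy-Pattern-Mining | CHUIM+HUOPM/CHUIM_FCHM.py | build_eucs
-- ===== SOURCE A (Python) =====
-- transactions = {
--     "T1": [('a', 1), ('b', 5), ('c', 1), ('d', 3), ('e', 1), ('f', 5)],
--     "T2": [('b', 4), ('c', 3), ('d', 3), ('e', 1)],
--     "T3": [('a', 1), ('c', 1), ('d', 1)],
--     "T4": [('a', 2), ('c', 6), ('e', 2), ('g', 5)],
--     "T5": [('b', 2), ('c', 2), ('e', 1), ('g', 2)],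
-- }
--
-- item_EU = {
--     'a': 5,
--     'b': 2,
--     'c': 1,
--     'd': 2,
--     'e': 3,
--     'f': 1,
--     'g': 1,
-- }
--
-- def findCoverset(itemset):
--     coverset = []
--     for key, val in transactions.items():
--         count = 0
--         for value in val:
--             if value[0] in itemset:
--                 count += 1
--         if count == len(itemset):
--             coverset.append(key)
--     return coverset
--
-- def calculate_Item_utility_in_Trans(item, trans):
--     util = 0
--     for ite in trans:
--         if(ite[0] == item):
--             util = ite[1]*item_EU[item]
--     return int(util)
--
-- def calculate_Trans_utility(trans):
--     util = 0
--     for item in trans: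
--         util += calculate_Item_utility_in_Trans(item[0], trans)
--     return int(util)
--
-- def calculate_Item_TWU(itemset):
--     TWU = 0
--     coverset = findCoverset(itemset)
--     for trans in coverset:
--         TWU += calculate_Trans_utility(transactions[trans])
--     return TWU
--
-- def build_eucs(transactions, item_EU):
--     items = sorted(item_EU.keys())
--     eucs = {item1: {item2: 0 for item2 in items if item2 != item1} for item1 in items}
--     for item1 in items:
--         for item2 in items:
--             if item1 != item2:
--                 itemset = [item1, item2]
--                 util = calculate_Item_TWU(itemset)
--                 eucs[item1][item2] += util
--     return eucs
-- ===== SOURCE B (Python) =====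
-- # Same module-level tables as the original file: build_eucs's helpers read these
-- # globals, not the parameters (the parameters only supply the item universe).
-- _TRANSACTIONS = {
--     "T1": [('a', 1), ('b', 5), ('c', 1), ('d', 3), ('e', 1), ('f', 5)],
--     "T2": [('b', 4), ('c', 3), ('d', 3), ('e', 1)],
--     "T3": [('a', 1), ('c', 1), ('d', 1)],
--     "T4": [('a', 2), ('c', 6), ('e', 2), ('g', 5)],
--     "T5": [('b', 2), ('c', 2), ('e', 1), ('g', 2)],
-- }
--
-- _ITEM_EU = {
--     'a': 5,
--     'b': 2,
--     'c': 1,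
--     'd': 2,
--     'e': 3,
--     'f': 1,
--     'g': 1,
-- }
--
--
-- def build_eucs(transactions, item_EU):
--     # Precompute, once, each module-level transaction's item set and utility;
--     # then each pair's TWU is a single membership-filtered sum over transactions.
--     data = []
--     for tr in _TRANSACTIONS.values():
--         names = {i for i, _ in tr}
--         tu = sum(q * _ITEM_EU[i] for i, q in tr)
--         data.append((names, tu))
--     items = sorted(item_EU)
--     return {
--         i1: {
--             i2: sum(tu for names, tu in data if i1 in names and i2 in names)
--             for i2 in items if i2 != i1
--         }
--         for i1 in items
--     }
-- ===== Notes on version B (the rewrite author's own statement) =====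
-- stated objective: faster
-- what changed: A recomputes the coverset and every covering transaction's utility from scratch for each ordered item pair (nested helper scans over the fixed module-level tables); B precomputes each fixed transaction's item set and utility once and obtains each pair's TWU by one membership-filtered sum over the 5 transactions.
import Mathlib
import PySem

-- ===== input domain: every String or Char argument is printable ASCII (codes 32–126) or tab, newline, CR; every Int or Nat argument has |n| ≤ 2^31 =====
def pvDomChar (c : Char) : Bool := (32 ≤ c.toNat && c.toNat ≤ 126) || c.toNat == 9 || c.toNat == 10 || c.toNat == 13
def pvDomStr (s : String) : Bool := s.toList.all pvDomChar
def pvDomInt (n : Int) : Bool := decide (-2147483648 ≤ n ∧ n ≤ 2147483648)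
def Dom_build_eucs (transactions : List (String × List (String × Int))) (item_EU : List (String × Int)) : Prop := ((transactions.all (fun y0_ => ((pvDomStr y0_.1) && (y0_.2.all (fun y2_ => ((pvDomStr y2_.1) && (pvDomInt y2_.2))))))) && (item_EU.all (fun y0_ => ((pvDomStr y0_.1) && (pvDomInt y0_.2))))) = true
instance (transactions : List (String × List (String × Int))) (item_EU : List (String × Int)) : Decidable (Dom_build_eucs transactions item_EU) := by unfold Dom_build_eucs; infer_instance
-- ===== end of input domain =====

-- B precomputes each fixed transaction's item set and utility once and sums them per
-- pair, where A rescans the fixed module-level tables for every ordered item pair.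
-- NOTE (as in the Python source): the helpers read the MODULE-LEVEL tables below, so
-- the `transactions` PARAMETER never influences the result; only item_EU's keys do.

-- ===== PORT A =====
-- the module-level tables of the Python file (plain data, shared by both ports)
def pyTransactions : List (String × List (String × Int)) :=
  [("T1", [("a", 1), ("b", 5), ("c", 1), ("d", 3), ("e", 1), ("f", 5)]),
   ("T2", [("b", 4), ("c", 3), ("d", 3), ("e", 1)]),
   ("T3", [("a", 1), ("c", 1), ("d", 1)]),
   ("T4", [("a", 2), ("c", 6), ("e", 2), ("g", 5)]),
   ("T5", [("b", 2), ("c", 2), ("e", 1), ("g", 2)])]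

def pyItemEU : List (String × Int) :=
  [("a", 5), ("b", 2), ("c", 1), ("d", 2), ("e", 3), ("f", 1), ("g", 1)]

def findCoverset (itemset : List String) : List String :=
  pyTransactions.foldl
    (fun coverset p =>
      if (p.2.foldl (fun count value => if itemset.contains value.1 then count + 1 else count) (0 : Int))
           == (itemset.length : Int)
      then coverset ++ [p.1] else coverset) []

def calculate_Item_utility_in_Trans (item : String) (trans : List (String × Int)) : Int :=
  trans.foldl (fun util ite => if ite.1 == item then ite.2 * ((PySem.Dict.mk pyItemEU).getD item 0) else util) 0

def calculate_Trans_utility (trans : List (String × Int)) : Int :=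
  trans.foldl (fun util item => util + calculate_Item_utility_in_Trans item.1 trans) 0

def calculate_Item_TWU (itemset : List String) : Int :=
  (findCoverset itemset).foldl
    (fun TWU trans => TWU + calculate_Trans_utility ((PySem.Dict.mk pyTransactions).getD trans [])) 0

def build_eucs (transactions : List (String × List (String × Int))) (item_EU : List (String × Int)) : List (String × List (String × Int)) :=
  let items := PySem.List.sorted ((PySem.Dict.ofList item_EU).keys) (fun x => x) false
  let eucs : PySem.Dict String (PySem.Dict String Int) :=
    items.foldl
      (fun d item1 =>
        d.insert item1 (items.foldl (fun d2 item2 => if item2 != item1 then d2.insert item2 0 else d2) PySem.Dict.empty))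
      PySem.Dict.empty
  let eucs :=
    items.foldl
      (fun e item1 =>
        items.foldl
          (fun e item2 =>
            if item1 != item2 then
              e.modify item1 PySem.Dict.empty (fun d => d.modify item2 0 (· + calculate_Item_TWU [item1, item2]))
            else e)
          e)
      eucs
  eucs.items.map (fun p => (p.1, p.2.items))

-- ===== PORT B =====
def build_eucs_alt (transactions : List (String × List (String × Int))) (item_EU : List (String × Int)) : List (String × List (String × Int)) :=
  let data : List (PySem.Set String × Int) :=
    pyTransactions.map (fun tr =>
      (PySem.Set.ofList (tr.2.map (fun e => e.1)),
       (tr.2.map (fun e => e.2 * ((PySem.Dict.mk pyItemEU).getD e.1 0))).sum))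
  let items := PySem.List.sorted ((PySem.Dict.ofList item_EU).keys) (fun x => x) false
  items.map (fun i1 =>
    (i1, (items.filter (fun i2 => i2 != i1)).map (fun i2 =>
      (i2, (data.map (fun d => if d.1.contains i1 && d.1.contains i2 then d.2 else 0)).sum))))

-- ===== PRECONDITION & SPEC =====
def Spec_build_eucs (transactions : List (String × List (String × Int))) (item_EU : List (String × Int)) (out : List (String × List (String × Int))) : Prop := out = build_eucs_alt transactions item_EU
instance (transactions : List (String × List (String × Int))) (item_EU : List (String × Int)) (out : List (String × List (String × Int))) : Decidable (Spec_build_eucs transactions item_EU out) := by unfold Spec_build_eucs; infer_instance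

-- ===== CLAIM (what is proved, stated in full; the proofs are below) =====
def Claim_equal_build_eucs : Prop := ∀ (transactions : List (String × List (String × Int))) (item_EU : List (String × Int)), Dom_build_eucs transactions item_EU → Spec_build_eucs transactions item_EU (build_eucs transactions item_EU)

-- ===== LEMMAS AND PROOFS =====

lemma countP_pair {i1 i2 : String} (l : List String) (h : i1 ≠ i2) :
    l.countP (fun a => [i1, i2].contains a) = l.count i1 + l.count i2 := by
  induction l with
  | nil => simp
  | cons x xs ih => by_cases h1 : x = i1 <;> by_cases h2 : x = i2 <;> simp_all <;> omega

lemma count2_iff {i1 i2 : String} (val : List (String × Int))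
    (hnd : (val.map Prod.fst).Nodup) (h : i1 ≠ i2) :
    (val.countP (fun e => [i1, i2].contains e.1) = 2) ↔
      ((val.map Prod.fst).contains i1 ∧ (val.map Prod.fst).contains i2) := by
  have hmap : val.countP (fun e => [i1, i2].contains e.1)
      = (val.map Prod.fst).countP (fun a => [i1, i2].contains a) := by
    rw [List.countP_map]; exact List.countP_congr (fun a _ => by simp)
  have c1 : (val.map Prod.fst).count i1 ≤ 1 := List.nodup_iff_count_le_one.mp hnd i1
  have c2 : (val.map Prod.fst).count i2 ≤ 1 := List.nodup_iff_count_le_one.mp hnd i2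
  rw [hmap, countP_pair _ h]
  rw [List.contains_iff_mem, List.contains_iff_mem, ← List.count_pos_iff, ← List.count_pos_iff]
  omega

lemma sum_filter_map {α : Type} (l : List α) (p : α → Bool) (f : α → Int) :
    ((l.filter p).map f).sum = (l.map (fun q => if p q then f q else 0)).sum := by
  induction l with
  | nil => rfl
  | cons x xs ih => by_cases hx : p x <;> simp [hx, ih]

-- condition equality, generic in the transaction as long as its item names are distinct

lemma cond_eq {i1 i2 : String} (q : String × List (String × Int))
    (hnd : (q.2.map Prod.fst).Nodup) (h : i1 ≠ i2) :
    ((q.2.foldl (fun count value => if [i1, i2].contains value.1 then count + 1 else count) (0 : Int))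
        == ((2 : Nat) : Int))
      = ((PySem.Set.ofList (q.2.map Prod.fst)).contains i1 && (PySem.Set.ofList (q.2.map Prod.fst)).contains i2) := by
  rw [PySem.List.foldl_count_if, zero_add]
  apply Bool.coe_iff_coe.mp
  have key := count2_iff q.2 hnd h
  rw [List.contains_iff_mem, List.contains_iff_mem] at key
  constructor
  · intro hc
    have h2 : q.2.countP (fun e => [i1, i2].contains e.1) = 2 := by
      have := beq_iff_eq.mp hc; exact_mod_cast this
    have hm := key.mp h2
    simp [PySem.Set.contains, PySem.Set.mem_ofList, hm.1, hm.2]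
  · intro hc
    simp only [Bool.and_eq_true, PySem.Set.contains, List.contains_iff_mem, PySem.Set.mem_ofList] at hc
    have h2 := key.mpr hc
    have : ((q.2.countP (fun e => [i1, i2].contains e.1) : Nat) : Int) = ((2:Nat):Int) := by exact_mod_cast h2
    exact beq_iff_eq.mpr this

lemma TWU_eq (i1 i2 : String) (h : i1 ≠ i2) :
    calculate_Item_TWU [i1, i2] =
      ((pyTransactions.map (fun tr =>
          (PySem.Set.ofList (tr.2.map (fun e => e.1)),
           (tr.2.map (fun e => e.2 * ((PySem.Dict.mk pyItemEU).getD e.1 0))).sum))).map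
        (fun d => if d.1.contains i1 && d.1.contains i2 then d.2 else 0)).sum := by
  unfold calculate_Item_TWU findCoverset
  rw [PySem.List.foldl_append_if, PySem.List.foldl_add]
  simp only [List.nil_append, List.map_map, zero_add]
  rw [sum_filter_map]
  apply congrArg List.sum
  apply List.map_congr_left
  intro q hq
  have hnd : (q.2.map Prod.fst).Nodup := by fin_cases hq <;> decide
  have hval : calculate_Trans_utility ((PySem.Dict.mk pyTransactions).getD q.1 []) =
      (q.2.map (fun e => e.2 * ((PySem.Dict.mk pyItemEU).getD e.1 0))).sum := by
    fin_cases hq <;> decide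
  have hcond := cond_eq (i1 := i1) (i2 := i2) q hnd h
  simp only [Function.comp_apply, List.length_cons, List.length_nil, Nat.reduceAdd]
  rw [hcond, hval]

lemma getD_foldl_modify_const_key {κ ν α : Type} [BEq κ] [LawfulBEq κ] [DecidableEq κ]
    (l : List α) (c : α → Bool) (k : κ) (d0 : ν) (g : α → ν → ν) (e : PySem.Dict κ ν) (x : κ) :
    ((l.foldl (fun e j => if c j then e.modify k d0 (g j) else e) e).getD x d0) =
      if x = k then (l.filter c).foldl (fun v j => g j v) (e.getD k d0) else e.getD x d0 := by
  induction l generalizing e with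
  | nil => simp only [List.filter_nil, List.foldl_nil]; split_ifs with hx <;> simp [hx]
  | cons j l ih =>
    by_cases hc : c j
    · simp only [List.foldl_cons, hc, if_true, ih, List.filter_cons, List.foldl_cons]
      split_ifs with hx
      · subst hx; rw [PySem.Dict.getD_modify_self]
      · rw [PySem.Dict.getD_modify_of_ne _ d0 _ hx]
    · simp [hc, ih]

lemma keys_foldl_modify_const_key {κ ν α : Type} [BEq κ] [LawfulBEq κ]
    (l : List α) (c : α → Bool) (k : κ) (d0 : ν) (g : α → ν → ν) (e : PySem.Dict κ ν)
    (hk : e.contains k = true) :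
    (l.foldl (fun e j => if c j then e.modify k d0 (g j) else e) e).keys = e.keys := by
  induction l generalizing e with
  | nil => rfl
  | cons j l ih =>
    by_cases hc : c j
    · simp only [List.foldl_cons, hc, if_true]
      rw [ih _ (by simp [PySem.Dict.contains_modify, hk])]
      rw [PySem.Dict.keys_modify, PySem.Dict.keys_insert_of_contains _ _ hk]
    · simp [hc, ih _ hk]

lemma getD_foldl_abstract {κ ν : Type} [BEq κ] [LawfulBEq κ] [DecidableEq κ]
    (S : κ → PySem.Dict κ ν → PySem.Dict κ ν) (f : κ → ν → ν) (d0 : ν)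
    (hS : ∀ k e x, (S k e).getD x d0 = if x = k then f k (e.getD k d0) else e.getD x d0)
    (l : List κ) (hnd : l.Nodup) (d : PySem.Dict κ ν) (x : κ) :
    (l.foldl (fun e k => S k e) d).getD x d0 =
      if x ∈ l then f x (d.getD x d0) else d.getD x d0 := by
  induction l generalizing d with
  | nil => simp
  | cons k l ih =>
    have hk : k ∉ l := (List.nodup_cons.mp hnd).1
    by_cases hx : x = k
    · subst hx
      simp only [List.foldl_cons, ih (List.nodup_cons.mp hnd).2, hS]
      simp [hk]
    · simp only [List.foldl_cons, ih (List.nodup_cons.mp hnd).2, hS, hx]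
      simp [hx]

lemma keys_foldl_abstract {κ ν : Type} [BEq κ]
    (S : κ → PySem.Dict κ ν → PySem.Dict κ ν)
    (hS : ∀ k e, k ∈ e.keys → (S k e).keys = e.keys)
    (l : List κ) (d : PySem.Dict κ ν) (hl : ∀ k ∈ l, k ∈ d.keys) :
    (l.foldl (fun e k => S k e) d).keys = d.keys := by
  induction l generalizing d with
  | nil => rfl
  | cons k l ih =>
    have h1 : (S k d).keys = d.keys := hS k d (hl k (by simp))
    simp only [List.foldl_cons]
    rw [ih (S k d) (fun j hj => h1 ▸ hl j (by simp [hj])), h1]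

theorem core (items : List String) (hnd : items.Nodup) :
    ((items.foldl
        (fun e item1 =>
          items.foldl
            (fun e item2 =>
              if item1 != item2 then
                e.modify item1 PySem.Dict.empty (fun d => d.modify item2 0 (· + calculate_Item_TWU [item1, item2]))
              else e)
            e)
        (items.foldl
          (fun d item1 =>
            d.insert item1 (items.foldl (fun d2 item2 => if item2 != item1 then d2.insert item2 0 else d2) PySem.Dict.empty))
          PySem.Dict.empty)).items.map (fun p => (p.1, p.2.items)))
    = items.map (fun i1 =>
        (i1, (items.filter (fun i2 => i2 != i1)).map (fun i2 =>
          (i2, ((pyTransactions.map (fun tr =>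
              (PySem.Set.ofList (tr.2.map (fun e => e.1)),
               (tr.2.map (fun e => e.2 * ((PySem.Dict.mk pyItemEU).getD e.1 0))).sum))).map
            (fun d => if d.1.contains i1 && d.1.contains i2 then d.2 else 0)).sum)))) := by
  -- abbreviations
  set util : String → String → Int := fun i1 i2 => calculate_Item_TWU [i1, i2] with hutil
  set inner0 : String → PySem.Dict String Int := fun i1 =>
    items.foldl (fun d2 item2 => if item2 != i1 then d2.insert item2 0 else d2) PySem.Dict.empty with hinner0
  set eucs0 : PySem.Dict String (PySem.Dict String Int) :=
    items.foldl (fun d item1 => d.insert item1 (inner0 item1)) PySem.Dict.empty with heucs0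
  -- the zero dict rows
  have hinner0_items : ∀ i1, (inner0 i1).items = (items.filter (fun j => j != i1)).map (fun j => (j, (0 : Int))) := by
    intro i1
    rw [hinner0]; simp only
    rw [← List.foldl_filter (p := fun j => j != i1)
      (f := fun (d2 : PySem.Dict String Int) (x : String) => d2.insert x (0 : Int)) (l := items)
      (init := PySem.Dict.empty)]
    rw [PySem.Dict.items_foldl_insert_fresh (k := fun x => x) (v := fun _ => (0:Int)) _ _
      (by intro a _; exact PySem.Dict.contains_empty a) (by simpa using hnd.filter _)]
    simp [PySem.Dict.empty]
  have hinner0_keys : ∀ i1, (inner0 i1).keys = items.filter (fun j => j != i1) := by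
    intro i1
    show ((inner0 i1).items.map Prod.fst) = _
    rw [hinner0_items]; simp [Function.comp_def]
  have heucs0_items : eucs0.items = items.map (fun i1 => (i1, inner0 i1)) := by
    rw [heucs0]
    rw [PySem.Dict.items_foldl_insert_fresh (k := fun x => x) (v := inner0) _ _
      (by intro a _; exact PySem.Dict.contains_empty a) (by simpa using hnd)]
    simp [PySem.Dict.empty]
  have heucs0_keys : eucs0.keys = items := by
    show (eucs0.items.map Prod.fst) = _
    rw [heucs0_items]; simp [Function.comp_def]
  have heucs0_getD : ∀ k ∈ items, eucs0.getD k PySem.Dict.empty = inner0 k := by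
    intro k hk
    have hmem : (k, inner0 k) ∈ eucs0.items := by
      rw [heucs0_items]; exact List.mem_map_of_mem hk
    have hknd : eucs0.keys.Nodup := by rw [heucs0_keys]; exact hnd
    exact PySem.Dict.getD_of_mem_items _ hmem hknd _
  -- the row update function
  set Phi : String → PySem.Dict String Int → PySem.Dict String Int := fun k v =>
    (items.filter (fun i2 => k != i2)).foldl (fun v j => v.modify j 0 (· + util k j)) v with hPhi
  -- outer step
  set S : String → PySem.Dict String (PySem.Dict String Int) → PySem.Dict String (PySem.Dict String Int) :=
    fun item1 e =>
      items.foldl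
        (fun e item2 =>
          if item1 != item2 then
            e.modify item1 PySem.Dict.empty (fun d => d.modify item2 0 (· + util item1 item2))
          else e)
        e with hS
  have hS_getD : ∀ k e x, (S k e).getD x PySem.Dict.empty
      = if x = k then Phi k (e.getD k PySem.Dict.empty) else e.getD x PySem.Dict.empty := by
    intro k e x
    rw [hS]; simp only
    exact getD_foldl_modify_const_key items (fun i2 => k != i2) k PySem.Dict.empty
      (fun i2 d => d.modify i2 0 (· + util k i2)) e x
  have hS_keys : ∀ k e, k ∈ PySem.Dict.keys e → (S k e).keys = PySem.Dict.keys e := by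
    intro k e hk
    rw [hS]; simp only
    exact keys_foldl_modify_const_key items (fun i2 => k != i2) k PySem.Dict.empty
      (fun i2 d => d.modify i2 0 (· + util k i2)) e ((PySem.Dict.contains_iff_mem_keys e k).mpr hk)
  set F := items.foldl (fun e item1 => S item1 e) eucs0 with hF
  have hF_keys : F.keys = items := by
    rw [hF, keys_foldl_abstract S hS_keys items eucs0 (by rw [heucs0_keys]; exact fun k hk => hk), heucs0_keys]
  have hF_getD : ∀ k ∈ items, F.getD k PySem.Dict.empty = Phi k (inner0 k) := by
    intro k hk
    rw [hF, getD_foldl_abstract S Phi PySem.Dict.empty hS_getD items hnd eucs0 k]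
    rw [if_pos hk, heucs0_getD k hk]
  -- rows after the update loop
  have hPhi_keys : ∀ k, (Phi k (inner0 k)).keys = items.filter (fun j => j != k) := by
    intro k
    rw [hPhi]; simp only
    rw [keys_foldl_abstract (fun j d => d.modify j 0 (· + util k j))
      (fun j d hj => by
        rw [PySem.Dict.keys_modify, PySem.Dict.keys_insert_of_contains _ _
          ((PySem.Dict.contains_iff_mem_keys d j).mpr hj)])
      _ _ (fun j hj => by
        rw [hinner0_keys]
        simp only [List.mem_filter, bne_iff_ne, ne_eq] at hj ⊢
        exact ⟨hj.1, fun hjk => hj.2 (by simp [hjk])⟩)]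
    exact hinner0_keys k
  have hPhi_getD : ∀ k, ∀ j ∈ items.filter (fun j => j != k),
      (Phi k (inner0 k)).getD j 0 = util k j := by
    intro k j hj
    have hj' : j ∈ items.filter (fun i2 => k != i2) := by
      simp only [List.mem_filter, bne_iff_ne, ne_eq] at hj ⊢
      exact ⟨hj.1, fun hkj => hj.2 (by simp [hkj])⟩
    rw [hPhi]; simp only
    rw [getD_foldl_abstract (fun j d => d.modify j 0 (· + util k j)) (fun j v => v + util k j) 0
      (fun a d x => PySem.Dict.getD_modify d a x 0 _) _ (hnd.filter _) _ j]
    rw [if_pos hj']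
    have hmem : (j, (0:Int)) ∈ (inner0 k).items := by
      rw [hinner0_items]; exact List.mem_map_of_mem hj
    have hknd : (inner0 k).keys.Nodup := by rw [hinner0_keys]; exact hnd.filter _
    have h0 : (inner0 k).getD j 0 = 0 := PySem.Dict.getD_of_mem_items _ hmem hknd 0
    rw [h0, zero_add]
  -- assemble
  rw [PySem.Dict.items_eq_map_keys F (by rw [hF_keys]; exact hnd) PySem.Dict.empty, hF_keys]
  rw [List.map_map]
  apply List.map_congr_left
  intro k hk
  simp only [Function.comp_apply]
  refine congrArg (fun z => (k, z)) ?_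
  rw [hF_getD k hk]
  rw [PySem.Dict.items_eq_map_keys (Phi k (inner0 k)) (by rw [hPhi_keys]; exact hnd.filter _) 0, hPhi_keys]
  apply List.map_congr_left
  intro j hj
  refine congrArg (fun z => (j, z)) ?_
  rw [hPhi_getD k j hj]
  have hkj : k ≠ j := by
    simp only [List.mem_filter, bne_iff_ne, ne_eq] at hj
    exact fun h => hj.2 h.symm
  exact TWU_eq k j hkj

-- ===== VERDICT (by name: the statement is the Claim_ definition above) =====
theorem build_eucs_spec : Claim_equal_build_eucs := by
  intro transactions item_EU _
  unfold Spec_build_eucs build_eucs build_eucs_alt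
  have hp := PySem.List.sorted_perm ((PySem.Dict.ofList item_EU).keys) (fun x => x) false
  have hnd : (PySem.List.sorted ((PySem.Dict.ofList item_EU).keys) (fun x => x) false).Nodup :=
    hp.symm.nodup (PySem.Dict.nodup_keys_ofList item_EU)
  dsimp only
  exact core _ hnd
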